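-- pv_equiv track=rewrite | github.com/olkko/ASD | lab12/dop_wzor.py | naive_method
-- ===== SOURCE A (Python) =====
-- def naive_method(text, pattern):
--     occur = 0
--     compar = 0
--     m = len(text)
--     n = len(pattern)
--     i = 0
--     while i <= m - n:
--         j = 0
--         while j < n and text[i+j] == pattern[j]:
--             compar += 1
--             j += 1
--
--         if j == n:
--             occur += 1
--
--         i += 1
--
--     return occur, compar
-- ===== SOURCE B (Python) =====
-- def naive_method(text, pattern):
--     # Column-wise filtering: keep the set of start positions whose first j
--     # pattern characters all match, one pattern character at a time.
--     m = len(text)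
--     n = len(pattern)
--     alive = list(range(m - n + 1))
--     compar = 0
--     for j in range(n):
--         c = pattern[j]
--         alive = [i for i in alive if text[i + j] == c]
--         compar += len(alive)
--     return len(alive), compar
-- ===== Notes on version B (the rewrite author's own statement) =====
-- stated objective: alternative
-- what changed: Replaces the nested per-position while-loops by a column-wise sieve: a list of still-alive start positions is filtered once per pattern character, compar is accumulated as the size of the surviving set per column and occur is the final survivor count.
import Mathlib
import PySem

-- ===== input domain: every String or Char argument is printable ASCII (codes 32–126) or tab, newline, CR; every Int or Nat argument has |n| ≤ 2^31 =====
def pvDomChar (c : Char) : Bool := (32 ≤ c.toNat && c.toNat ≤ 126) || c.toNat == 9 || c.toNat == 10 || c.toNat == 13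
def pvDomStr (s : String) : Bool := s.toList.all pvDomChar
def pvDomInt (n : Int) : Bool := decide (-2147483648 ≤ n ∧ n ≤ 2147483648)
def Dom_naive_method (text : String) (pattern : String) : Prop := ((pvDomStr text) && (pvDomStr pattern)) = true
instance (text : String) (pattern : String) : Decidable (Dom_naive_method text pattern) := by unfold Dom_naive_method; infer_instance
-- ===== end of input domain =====

-- B replaces A's nested per-position scan by a column-wise sieve over surviving start
-- positions (alternative decomposition, same worst-case cost); return values proved equal.

-- ===== PORT A =====
-- inner while: `while j < n and text[i+j] == pattern[j]: compar += 1; j += 1` ; returns (j, compar)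
def naiveInner (tl pl : List Char) (i n : Int) (j compar : Int) : Int × Int :=
  if _h : j < n then
    match PySem.List.pyGet? tl (i + j), PySem.List.pyGet? pl j with
    | some a, some b =>
        if a = b then naiveInner tl pl i n (j + 1) (compar + 1) else (j, compar)
    | _, _ => (j, compar)   -- IndexError; unreachable from naiveOuter's in-range calls
  else (j, compar)
termination_by (n - j).toNat
decreasing_by omega

-- outer while: `while i <= m - n: … i += 1`
def naiveOuter (tl pl : List Char) (m n : Int) (i occur compar : Int) : Int × Int :=
  if _h : i ≤ m - n then
    let r := naiveInner tl pl i n 0 compar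
    naiveOuter tl pl m n (i + 1) (if r.1 = n then occur + 1 else occur) r.2
  else (occur, compar)
termination_by (m - n + 1 - i).toNat
decreasing_by omega

def naive_method (text : String) (pattern : String) : Int × Int :=
  naiveOuter text.toList pattern.toList (PySem.Str.len text) (PySem.Str.len pattern) 0 0 0

-- ===== PORT B =====
-- Source B: alive = list(range(m-n+1)); for j in range(n): filter alive by text[i+j]==pattern[j],
-- compar += len(alive); return len(alive), compar
def naive_method_alt (text : String) (pattern : String) : Int × Int :=
  let tl := text.toList
  let pl := pattern.toList
  let m : Int := PySem.Str.len text
  let n : Int := PySem.Str.len pattern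
  let r := (List.range pl.length).foldl
    (fun (st : List Int × Int) (j : Nat) =>
      let c := pl.getD j ' '   -- pattern[j]; j < len(pattern) by the range
      let alive := st.1.filter (fun i => decide (PySem.List.pyGet? tl (i + (j : Int)) = some c))
      (alive, st.2 + (alive.length : Int)))
    (PySem.List.pyRange 0 (m - n + 1) 1, (0 : Int))
  ((r.1.length : Int), r.2)

-- ===== PRECONDITION & SPEC =====
def Spec_naive_method (text : String) (pattern : String) (out : Int × Int) : Prop := out = naive_method_alt text pattern
instance (text : String) (pattern : String) (out : Int × Int) : Decidable (Spec_naive_method text pattern out) := by unfold Spec_naive_method; infer_instance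

-- ===== CLAIM (what is proved, stated in full; the proofs are below) =====
def Claim_equal_naive_method : Prop := ∀ (text : String) (pattern : String), Dom_naive_method text pattern → Spec_naive_method text pattern (naive_method text pattern)

-- ===== LEMMAS AND PROOFS =====

-- length of the longest common prefix
def lcp : List Char → List Char → Nat
  | a :: s, b :: t => if a = b then lcp s t + 1 else 0
  | _, _ => 0

theorem lcp_le_right (s t : List Char) : lcp s t ≤ t.length := by
  induction s generalizing t with
  | nil => cases t <;> simp [lcp]
  | cons a s ih =>
    cases t with
    | nil => simp [lcp]
    | cons b t =>
      by_cases h : a = b <;> simp [lcp, h]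
      exact ih t

theorem lcp_succ_iff (s t : List Char) (j : Nat) (hj : j < t.length) :
    j + 1 ≤ lcp s t ↔ (j ≤ lcp s t ∧ s[j]? = some t[j]) := by
  induction j generalizing s t with
  | zero =>
    cases t with
    | nil => simp at hj
    | cons b t =>
      cases s with
      | nil => simp [lcp]
      | cons a s => by_cases h : a = b <;> simp [lcp, h]
  | succ j ih =>
    cases t with
    | nil => simp at hj
    | cons b t =>
      cases s with
      | nil => simp [lcp]
      | cons a s =>
        by_cases h : a = b
        · subst h
          have hj' : j < t.length := by simpa using hj
          simp only [lcp, if_true, List.getElem?_cons_succ, List.getElem_cons_succ]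
          constructor
          · intro hle
            exact ⟨by omega, ((ih s t hj').mp (by omega)).2⟩
          · intro ⟨h1, h2⟩
            have := (ih s t hj').mpr ⟨by omega, h2⟩
            omega
        · simp [lcp, h]

theorem innerA (tl pl : List Char) (i : Nat) (hi : i + pl.length ≤ tl.length) :
    ∀ fuel (j : Nat) (compar : Int), fuel = pl.length - j → j ≤ lcp (tl.drop i) pl →
      naiveInner tl pl (i : Int) (pl.length : Int) (j : Int) compar =
        ((lcp (tl.drop i) pl : Int), compar + ((lcp (tl.drop i) pl - j : Nat) : Int)) := by
  intro fuel
  induction fuel with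
  | zero =>
    intro j compar hf hj
    have hL := lcp_le_right (tl.drop i) pl
    have hjn : j = pl.length := by omega
    rw [naiveInner, dif_neg (by exact_mod_cast by omega : ¬ ((j : Int) < (pl.length : Int)))]
    simp only [Prod.mk.injEq]
    omega
  | succ f ih =>
    intro j compar hf hj
    have hL := lcp_le_right (tl.drop i) pl
    have hjn : j < pl.length := by omega
    have hix : i + j < tl.length := by omega
    have hcast : (i : Int) + (j : Int) = ((i + j : Nat) : Int) := by push_cast; ring
    have h1 : PySem.List.pyGet? tl ((i : Int) + (j : Int)) = some tl[i + j] := by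
      rw [hcast, PySem.List.pyGet?_natCast, List.getElem?_eq_getElem hix]
    have h2 : PySem.List.pyGet? pl ((j : Nat) : Int) = some pl[j] := by
      rw [PySem.List.pyGet?_natCast, List.getElem?_eq_getElem hjn]
    have hdrop : (tl.drop i)[j]? = some tl[i + j] := by
      rw [List.getElem?_drop, List.getElem?_eq_getElem hix]
    rw [naiveInner, dif_pos (by exact_mod_cast hjn : ((j : Int) < (pl.length : Int)))]
    rw [h1, h2]
    by_cases hlt : j + 1 ≤ lcp (tl.drop i) pl
    · have hc := ((lcp_succ_iff (tl.drop i) pl j hjn).mp hlt).2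
      have heq : tl[i + j] = pl[j] := by
        rw [hdrop] at hc; exact Option.some.inj hc
      simp only [heq, if_true]
      have hrec := ih (j + 1) (compar + 1) (by omega) hlt
      rw [show ((j : Int) + 1) = ((j + 1 : Nat) : Int) by push_cast; ring, hrec]
      simp only [Prod.mk.injEq, true_and]
      omega
    · have hne : tl[i + j] ≠ pl[j] := by
        intro heq
        exact hlt ((lcp_succ_iff (tl.drop i) pl j hjn).mpr ⟨hj, by rw [hdrop, heq]⟩)
      simp only [if_neg hne]
      simp only [Prod.mk.injEq]
      omega

def lcpAt (tl pl : List Char) (q : Nat) : Nat := lcp (tl.drop q) pl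

def Kpos (tl pl : List Char) : Nat := tl.length + 1 - pl.length

theorem outerA (tl pl : List Char) :
    ∀ cnt (i : Nat) (occ comp : Int), i + cnt = Kpos tl pl →
      naiveOuter tl pl (tl.length : Int) (pl.length : Int) (i : Int) occ comp =
        (occ + (((List.range' i cnt).filter
            (fun q => decide (pl.length ≤ lcpAt tl pl q))).length : Int),
         comp + ((List.range' i cnt).map (fun q => (lcpAt tl pl q : Int))).sum) := by
  intro cnt
  induction cnt with
  | zero =>
    intro i occ comp hK
    simp only [Kpos] at hK
    rw [naiveOuter, dif_neg (by omega : ¬ ((i : Int) ≤ (tl.length : Int) - (pl.length : Int)))]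
    simp
  | succ cnt ihc =>
    intro i occ comp hK
    simp only [Kpos] at hK
    have hple : i + pl.length ≤ tl.length := by omega
    have hcond : (i : Int) ≤ (tl.length : Int) - (pl.length : Int) := by omega
    have hL := lcp_le_right (tl.drop i) pl
    have hinner := innerA tl pl i hple (pl.length - 0) 0 comp rfl (Nat.zero_le _)
    rw [Nat.cast_zero, Nat.sub_zero] at hinner
    rw [naiveOuter, dif_pos hcond]
    simp only [hinner]
    have hiff : (((lcp (tl.drop i) pl : Nat) : Int) = (pl.length : Int))
        = (decide (pl.length ≤ lcpAt tl pl i) = true) := by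
      simp only [lcpAt, decide_eq_true_eq, Nat.cast_inj]
      exact propext (by constructor <;> (intro h'; omega))
    have hrec := ihc (i + 1)
      (if ((lcp (tl.drop i) pl : Nat) : Int) = (pl.length : Int) then occ + 1 else occ)
      (comp + ((lcp (tl.drop i) pl : Nat) : Int)) (by simp only [Kpos]; omega)
    rw [show ((i : Int) + 1) = ((i + 1 : Nat) : Int) by push_cast; ring, hrec]
    rw [List.range'_succ, List.filter_cons, List.map_cons, List.sum_cons]
    by_cases hd : pl.length ≤ lcpAt tl pl i
    · rw [if_pos (by rw [hiff]; simpa using hd), if_pos (by simpa using hd)]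
      simp only [List.length_cons, Prod.mk.injEq, lcpAt]
      omega
    · rw [if_neg (by rw [hiff]; simpa using hd), if_neg (by simpa using hd)]
      simp only [Prod.mk.injEq, lcpAt]
      simp only [lcpAt] at hd
      exact ⟨trivial, by ring⟩

theorem sum_min (k : Nat) : ∀ n : Nat,
    ((List.range n).map (fun t => if t + 1 ≤ k then (1 : Int) else 0)).sum = (min k n : Int) := by
  intro n
  induction n with
  | zero => simp
  | succ n ih =>
    rw [List.range_succ, List.map_append, List.sum_append, ih]
    by_cases h : n + 1 ≤ k
    · rw [List.map_singleton, List.sum_singleton, if_pos h]; omega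
    · rw [List.map_singleton, List.sum_singleton, if_neg h]; omega

theorem sum_count (L : List Nat) (f : Nat → Nat) (n : Nat) (h : ∀ q ∈ L, f q ≤ n) :
    ((List.range n).map (fun t =>
        (((L.filter (fun q => decide (t + 1 ≤ f q))).length : Nat) : Int))).sum
      = (L.map (fun q => (f q : Int))).sum := by
  induction L with
  | nil => simp
  | cons q L ih =>
    have hq : f q ≤ n := h q (by simp)
    have hL : ∀ x ∈ L, f x ≤ n := fun x hx => h x (List.mem_cons_of_mem q hx)
    have step : ∀ t : Nat,
        ((((q :: L).filter (fun x => decide (t + 1 ≤ f x))).length : Nat) : Int)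
          = (if t + 1 ≤ f q then (1 : Int) else 0)
            + (((L.filter (fun x => decide (t + 1 ≤ f x))).length : Nat) : Int) := by
      intro t
      by_cases ht : t < f q
      · rw [if_pos (by omega)]
        simp [ht]
        ring
      · rw [if_neg (by omega)]
        simp [ht]
    calc ((List.range n).map _).sum
        = ((List.range n).map (fun t =>
            (if t + 1 ≤ f q then (1 : Int) else 0)
              + (((L.filter (fun x => decide (t + 1 ≤ f x))).length : Nat) : Int))).sum := by
          exact congrArg List.sum (List.map_congr_left (fun t _ => step t))
      _ = ((List.range n).map (fun t => if t + 1 ≤ f q then (1 : Int) else 0)).sum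
            + ((List.range n).map (fun t =>
                (((L.filter (fun x => decide (t + 1 ≤ f x))).length : Nat) : Int))).sum := by
          exact PySem.List.sum_map_add_int (List.range n) _ _
      _ = ((f q : Int)) + (L.map (fun x => (f x : Int))).sum := by
          rw [sum_min, ih hL]; congr 1; omega
      _ = ((q :: L).map (fun x => (f x : Int))).sum := by simp

theorem colB (tl pl : List Char) :
    ∀ j, j ≤ pl.length →
      (List.range j).foldl
        (fun (st : List Int × Int) (t : Nat) =>
          let c := pl.getD t ' '
          let alive := st.1.filter (fun i => decide (PySem.List.pyGet? tl (i + (t : Int)) = some c))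
          (alive, st.2 + (alive.length : Int)))
        (PySem.List.pyRange 0 ((tl.length : Int) - (pl.length : Int) + 1) 1, (0 : Int))
      = (((List.range (Kpos tl pl)).filter
            (fun q => decide (j ≤ lcpAt tl pl q))).map (fun q => Int.ofNat q),
         ((List.range j).map (fun t =>
            (((List.range (Kpos tl pl)).filter
                (fun q => decide (t + 1 ≤ lcpAt tl pl q))).length : Int))).sum) := by
  intro j
  induction j with
  | zero =>
    intro _
    have hK : ((tl.length : Int) - (pl.length : Int) + 1 - 0).toNat = Kpos tl pl := by
      simp only [Kpos]; omega
    rw [List.range_zero, List.foldl_nil, PySem.List.pyRange_one, hK]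
    simp
  | succ j ihj =>
    intro hj1
    have hjn : j < pl.length := hj1
    rw [List.range_succ, List.foldl_append, ihj (by omega), List.foldl_cons, List.foldl_nil]
    have hc : pl.getD j ' ' = pl[j] := List.getD_eq_getElem pl ' ' hjn
    have hpt : ∀ q : Nat,
        (decide (PySem.List.pyGet? tl (Int.ofNat q + (j : Int)) = some pl[j])
          && decide (j ≤ lcpAt tl pl q)) = decide (j + 1 ≤ lcpAt tl pl q) := by
      intro q
      have hg : PySem.List.pyGet? tl (Int.ofNat q + (j : Int)) = (tl.drop q)[j]? := by
        rw [show (Int.ofNat q + (j : Int)) = ((q + j : Nat) : Int) by rw [Int.ofNat_eq_natCast]; push_cast; ring,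
          PySem.List.pyGet?_natCast, List.getElem?_drop]
      rw [hg, Bool.and_comm, ← Bool.decide_and]
      refine decide_eq_decide.mpr ?_
      unfold lcpAt
      exact (lcp_succ_iff (tl.drop q) pl j hjn).symm
    simp only [hc, List.filter_map, Function.comp_def, List.filter_filter,
      List.length_map, List.map_append, List.sum_append,
      List.map_cons, List.sum_cons, List.map_nil, List.sum_nil, add_zero]
    have hfe : List.filter
          (fun a =>
            decide (PySem.List.pyGet? tl (Int.ofNat a + (j : Int)) = some pl[j])
              && decide (j ≤ lcpAt tl pl a)) (List.range (Kpos tl pl))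
        = List.filter (fun a => decide (j + 1 ≤ lcpAt tl pl a))
            (List.range (Kpos tl pl)) :=
      List.filter_congr (fun a _ => hpt a)
    rw [hfe]

-- ===== VERDICT (by name: the statement is the Claim_ definition above) =====
theorem naive_method_spec : Claim_equal_naive_method := by
  intro text pattern _
  unfold Spec_naive_method naive_method naive_method_alt
  simp only [PySem.Str.len_eq]
  have hA := outerA text.toList pattern.toList (Kpos text.toList pattern.toList) 0 0 0
    (Nat.zero_add _)
  rw [Nat.cast_zero] at hA
  rw [hA]
  have hB := colB text.toList pattern.toList pattern.toList.length le_rfl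
  rw [hB]
  rw [← List.range_eq_range', List.length_map]
  rw [sum_count (List.range (Kpos text.toList pattern.toList))
    (lcpAt text.toList pattern.toList) pattern.toList.length
    (fun q _ => lcp_le_right _ _)]
  simp
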